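-- pv_equiv track=rewrite | github.com/dynatrace-oss/unguard | src/rag-service/data_poisoning_detection_strategies/embeddings_cluster_analysis/embeddings_cluster_analysis.py | _get_ngrams_with_position
-- ===== SOURCE A (Python) =====
-- from typing import Tuple
-- from typing import Dict, List, DefaultDict
--
-- MAX_NGRAM = 10  # max n-gram size for phrase extraction
--
-- def _get_ngrams_with_position(tokens: List[str]) -> List[Tuple[str, int]]:
--     """
--     Computes all n-grams (from 1 to MAX_NGRAM) from the list of tokens.
--     Returns all n-gram phrases and their positions in the text.
--     """
--     ngrams: List[Tuple[str, int]] = []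
--
--     for n in range(1, MAX_NGRAM + 1):
--         if len(tokens) < n:
--             break
--         for start_index in range(len(tokens) - n + 1):
--             ngram_tokens = tokens[start_index : start_index + n]
--             phrase = " ".join(ngram_tokens)
--             ngrams.append((phrase, start_index))
--
--     return ngrams
-- ===== SOURCE B (Python) =====
-- from typing import Tuple, List
--
-- MAX_NGRAM = 10  # max n-gram size for phrase extraction
--
-- def _get_ngrams_with_position(tokens: List[str]) -> List[Tuple[str, int]]:
--     """Level-by-level n-gram construction: each level extends the previous
--     level's phrases by one token instead of re-slicing and re-joining."""
--     ngrams: List[Tuple[str, int]] = []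
--     prev = [(t, i) for i, t in enumerate(tokens)]
--     ngrams.extend(prev)
--     for n in range(2, MAX_NGRAM + 1):
--         nxt = [(phrase + " " + tokens[start + n - 1], start)
--                for phrase, start in prev
--                if start + n - 1 < len(tokens)]
--         if not nxt:
--             break
--         ngrams.extend(nxt)
--         prev = nxt
--     return ngrams
-- ===== Notes on version B (the rewrite author's own statement) =====
-- stated objective: alternative
-- what changed: B builds the n-gram levels incrementally, extending each previous-level phrase by one token (one string append and one index lookup per n-gram) instead of re-slicing the token list and re-joining the whole slice for every n-gram as A does.
import Mathlib
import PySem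

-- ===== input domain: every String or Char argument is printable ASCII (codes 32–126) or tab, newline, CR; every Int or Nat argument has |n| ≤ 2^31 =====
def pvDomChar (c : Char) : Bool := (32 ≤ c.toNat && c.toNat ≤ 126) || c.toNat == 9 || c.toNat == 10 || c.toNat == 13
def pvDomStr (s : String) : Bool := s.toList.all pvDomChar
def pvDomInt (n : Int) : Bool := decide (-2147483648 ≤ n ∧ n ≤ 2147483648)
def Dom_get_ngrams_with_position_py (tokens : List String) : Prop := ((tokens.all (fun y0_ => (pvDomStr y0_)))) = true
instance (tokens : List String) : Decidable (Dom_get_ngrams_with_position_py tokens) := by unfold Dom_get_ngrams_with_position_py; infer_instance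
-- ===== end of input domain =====

-- B builds the n-gram levels incrementally (each level extends the previous level's
-- phrases by one token) instead of re-slicing and re-joining for every n-gram; same output.

-- ===== PORT A =====
-- " ".join(ngram_tokens)
def pvJoinSp (xs : List String) : String := PySem.Str.join " " xs

-- inner loop: for start_index in range(len(tokens) - n + 1): ngrams.append(...)
def pvAInner (tokens : List String) (n : Int) (ngrams : List (String × Int)) : List (String × Int) :=
  (PySem.List.pyRange 0 ((tokens.length : Int) - n + 1) 1).foldl
    (fun acc start =>
      acc ++ [(pvJoinSp (PySem.List.slice tokens (some start) (some (start + n))), start)])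
    ngrams

-- outer loop over n in range(1, MAX_NGRAM + 1) with break when len(tokens) < n
def pvALoop (tokens : List String) : List Int → List (String × Int) → List (String × Int)
  | [], ngrams => ngrams
  | n :: rest, ngrams =>
      if (tokens.length : Int) < n then ngrams
      else pvALoop tokens rest (pvAInner tokens n ngrams)

def get_ngrams_with_position_py (tokens : List String) : List (String × Int) :=
  pvALoop tokens (PySem.List.pyRange 1 (10 + 1) 1) []

-- ===== PORT B =====
-- one level: [(phrase + " " + tokens[start+n-1], start) for phrase, start in prev if start+n-1 < len(tokens)]
-- (the index start+n-1 is guarded to be < len(tokens) and is nonnegative for every pair B builds,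
--  so Python's tokens[start+n-1] is exactly pyGetD with an unused default)
def pvBNext (tokens : List String) (n : Int) (prev : List (String × Int)) : List (String × Int) :=
  prev.foldl
    (fun acc p =>
      if p.2 + n - 1 < (tokens.length : Int) then
        acc ++ [(p.1 ++ " " ++ PySem.List.pyGetD tokens (p.2 + n - 1) "", p.2)]
      else acc)
    []

-- for n in range(2, MAX_NGRAM + 1): nxt = …; if not nxt: break; ngrams.extend(nxt); prev = nxt
def pvBLoop (tokens : List String) : List Int → List (String × Int) → List (String × Int) → List (String × Int)
  | [], _, ngrams => ngrams
  | n :: rest, prev, ngrams =>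
      let nxt := pvBNext tokens n prev
      if nxt = [] then ngrams
      else pvBLoop tokens rest nxt (ngrams ++ nxt)

def get_ngrams_with_position_py_alt (tokens : List String) : List (String × Int) :=
  let prev := (PySem.List.enumerate tokens 0).map (fun p => (p.2, p.1))
  pvBLoop tokens (PySem.List.pyRange 2 (10 + 1) 1) prev prev

-- ===== PRECONDITION & SPEC =====
def Spec_get_ngrams_with_position_py (tokens : List String) (out : List (String × Int)) : Prop := out = get_ngrams_with_position_py_alt tokens
instance (tokens : List String) (out : List (String × Int)) : Decidable (Spec_get_ngrams_with_position_py tokens out) := by unfold Spec_get_ngrams_with_position_py; infer_instance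

-- ===== CLAIM (what is proved, stated in full; the proofs are below) =====
def Claim_equal_get_ngrams_with_position_py : Prop := ∀ (tokens : List String), Dom_get_ngrams_with_position_py tokens → Spec_get_ngrams_with_position_py tokens (get_ngrams_with_position_py tokens)

-- ===== LEMMAS AND PROOFS =====

-- the list of n-grams of size n with their positions, as both programs produce it
def pvLevel (tokens : List String) (n : Nat) : List (String × Int) :=
  (List.range (tokens.length + 1 - n)).map
    (fun i => (pvJoinSp ((tokens.drop i).take n), (i : Int)))

theorem pvJoinSp_append_singleton (ys : List String) (y : String) (h : ys ≠ []) :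
    pvJoinSp (ys ++ [y]) = pvJoinSp ys ++ " " ++ y := by
  apply String.toList_inj.mp
  simp only [pvJoinSp, PySem.Str.toList_join, String.toList_append, List.map_append, List.map_cons, List.map_nil]
  induction ys with
  | nil => exact absurd rfl h
  | cons a ys ih =>
    cases ys with
    | nil => simp [PySem.Chars.join_cons_cons, PySem.Chars.join_singleton]
    | cons b ys =>
      have ih' := ih (by simp)
      simp only [List.map_cons, List.cons_append] at ih'
      simp only [List.cons_append, List.map_cons, PySem.Chars.join_cons_cons]
      rw [ih']
      simp [List.append_assoc]

theorem pvAInner_eq (tokens : List String) (n : Nat) (_hn : 1 ≤ n) (hle : n ≤ tokens.length)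
    (ngrams : List (String × Int)) :
    pvAInner tokens (n : Int) ngrams = ngrams ++ pvLevel tokens n := by
  unfold pvAInner pvLevel
  rw [PySem.List.foldl_append_singleton_eq_map]
  congr 1
  have hb : ((tokens.length : Int) - (n : Int) + 1) = ((tokens.length + 1 - n : Nat) : Int) := by omega
  rw [hb, PySem.List.pyRange_zero_nat, List.map_map]
  apply List.map_congr_left
  intro k _
  simp only [Function.comp_apply]
  rw [PySem.List.slice_natCast_add]

theorem pvBNext_eq (tokens : List String) (n : Nat) (hn : 1 ≤ n) :
    pvBNext tokens ((n : Int) + 1) (pvLevel tokens n) = pvLevel tokens (n + 1) := by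
  unfold pvBNext pvLevel
  have hfold := PySem.List.foldl_append_if
      (p := fun p : String × Int => decide (p.2 + ((n : Int) + 1) - 1 < (tokens.length : Int)))
      (f := fun p : String × Int =>
        (p.1 ++ " " ++ PySem.List.pyGetD tokens (p.2 + ((n : Int) + 1) - 1) "", p.2))
      ((List.range (tokens.length + 1 - n)).map
        (fun i => (pvJoinSp ((tokens.drop i).take n), (i : Int)))) []
  simp only [decide_eq_true_eq] at hfold
  rw [hfold]
  simp only [List.nil_append, List.filter_map, List.map_map]
  by_cases hlen : n + 1 ≤ tokens.length
  · have hK : tokens.length + 1 - n = (tokens.length - n) + 1 := by omega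
    rw [hK, List.range_succ, List.filter_append]
    have h1 : (List.range (tokens.length - n)).filter
        ((fun (p : String × Int) => decide (p.2 + ((n : Int) + 1) - 1 < (tokens.length : Int))) ∘
          (fun i => (pvJoinSp ((tokens.drop i).take n), (i : Int)))) = List.range (tokens.length - n) := by
      apply List.filter_eq_self.mpr
      intro i hi
      simp only [Function.comp_apply, decide_eq_true_eq]
      have := List.mem_range.mp hi
      omega
    have h2 : ([tokens.length - n] : List ℕ).filter
        ((fun (p : String × Int) => decide (p.2 + ((n : Int) + 1) - 1 < (tokens.length : Int))) ∘
          (fun i => (pvJoinSp ((tokens.drop i).take n), (i : Int)))) = [] := by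
      simp only [List.filter_cons, List.filter_nil, Function.comp_apply, decide_eq_true_eq]
      rw [if_neg]; omega
    rw [h1, h2, List.append_nil]
    have hM : tokens.length + 1 - (n + 1) = tokens.length - n := by omega
    rw [hM]
    apply List.map_congr_left
    intro i hi
    have hi' : i + n < tokens.length := by have := List.mem_range.mp hi; omega
    simp only [Function.comp_apply]
    have hidx : ((i : Int) + ((n : Int) + 1) - 1) = ((i + n : Nat) : Int) := by push_cast; ring
    rw [hidx, PySem.List.pyGetD_natCast, List.getD_eq_getElem _ _ (by omega)]
    congr 1
    have hdrop : (tokens.drop i).take (n + 1) = (tokens.drop i).take n ++ [tokens[i + n]] := by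
      rw [List.take_add_one]
      congr 1
      rw [List.getElem?_drop, List.getElem?_eq_getElem (by omega)]
      rfl
    have hne : (tokens.drop i).take n ≠ [] := by
      simp only [ne_eq, List.take_eq_nil_iff, List.drop_eq_nil_iff, not_or]
      omega
    rw [hdrop, pvJoinSp_append_singleton _ _ hne]
  · -- too few tokens: every candidate start fails the guard, and the next level is empty
    have hM : tokens.length + 1 - (n + 1) = 0 := by omega
    rw [hM]
    simp only [List.range_zero, List.map_nil, List.map_eq_nil_iff, List.filter_eq_nil_iff]
    intro i hi
    simp only [List.mem_range] at hi
    simp only [Function.comp_apply, decide_eq_true_eq]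
    omega

theorem pvLevel_eq_nil_iff (tokens : List String) (n : Nat) :
    pvLevel tokens n = [] ↔ tokens.length + 1 ≤ n := by
  simp only [pvLevel, List.map_eq_nil_iff, List.range_eq_nil]
  omega

theorem pvLoops_agree (tokens : List String) :
    ∀ (k n : Nat), 1 ≤ n → ∀ acc,
      pvALoop tokens (PySem.List.pyRange ((n : Int) + 1) ((n : Int) + 1 + (k : Int)) 1) acc =
      pvBLoop tokens (PySem.List.pyRange ((n : Int) + 1) ((n : Int) + 1 + (k : Int)) 1)
        (pvLevel tokens n) acc := by
  intro k
  induction k with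
  | zero =>
    intro n hn acc
    rw [PySem.List.pyRange_one_eq_nil (by omega)]
    rfl
  | succ k ih =>
    intro n hn acc
    rw [PySem.List.pyRange_one_cons (by omega)]
    show pvALoop tokens _ acc = pvBLoop tokens _ _ acc
    rw [pvALoop, pvBLoop]
    have hnext : pvBNext tokens ((n : Int) + 1) (pvLevel tokens n) = pvLevel tokens (n + 1) :=
      pvBNext_eq tokens n hn
    rw [hnext]
    by_cases hlen : (tokens.length : Int) < (n : Int) + 1
    · rw [if_pos hlen, if_pos ((pvLevel_eq_nil_iff tokens (n + 1)).mpr (by omega))]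
    · rw [if_neg hlen, if_neg (by
        intro hnil
        have := (pvLevel_eq_nil_iff tokens (n + 1)).mp hnil
        omega)]
      have hle : n + 1 ≤ tokens.length := by omega
      have hinner : pvAInner tokens ((n : Int) + 1) acc = acc ++ pvLevel tokens (n + 1) := by
        have h := pvAInner_eq tokens (n + 1) (by omega) hle acc
        rwa [show (((n + 1 : Nat)) : Int) = (n : Int) + 1 from by push_cast; ring] at h
      rw [hinner]
      have h := ih (n + 1) (by omega) (acc ++ pvLevel tokens (n + 1))
      rwa [show (((n + 1 : Nat)) : Int) + 1 + (k : Int) = (n : Int) + 1 + ((k + 1 : Nat) : Int)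
            from by push_cast; ring,
          show (((n + 1 : Nat)) : Int) + 1 = (n : Int) + 1 + 1 from by push_cast; ring] at h

theorem pvEnum_eq_level_one (tokens : List String) :
    (PySem.List.enumerate tokens 0).map (fun p => (p.2, p.1)) = pvLevel tokens 1 := by
  apply List.ext_getElem
  · simp [pvLevel, PySem.List.length_enumerate]
  · intro k h1 h2
    have hk : k < tokens.length := by
      simpa [PySem.List.length_enumerate] using h1
    simp only [List.getElem_map, PySem.List.getElem_enumerate, pvLevel]
    have : tokens.length + 1 - 1 = tokens.length := by omega
    simp only [this, List.getElem_range]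
    have hdrop : (tokens.drop k).take 1 = [tokens[k]] := by
      rw [List.drop_eq_getElem_cons hk, List.take_succ_cons, List.take_zero]
    rw [hdrop]
    have hj : pvJoinSp [tokens[k]] = tokens[k] := by
      apply String.toList_inj.mp
      simp [pvJoinSp, PySem.Str.toList_join, PySem.Chars.join_singleton]
    simp [hj]

-- ===== VERDICT (by name: the statement is the Claim_ definition above) =====
theorem get_ngrams_with_position_py_spec : Claim_equal_get_ngrams_with_position_py := by
  intro tokens _
  show get_ngrams_with_position_py tokens = get_ngrams_with_position_py_alt tokens
  by_cases h0 : tokens = []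
  · subst h0; rfl
  · have hlen : 1 ≤ tokens.length := by
      cases tokens with
      | nil => exact absurd rfl h0
      | cons a l => simp
    unfold get_ngrams_with_position_py get_ngrams_with_position_py_alt
    rw [pvEnum_eq_level_one]
    rw [show (PySem.List.pyRange 1 (10 + 1) 1) = 1 :: PySem.List.pyRange (1 + 1) (10 + 1) 1 from
      PySem.List.pyRange_one_cons (by norm_num)]
    rw [pvALoop]
    rw [if_neg (by omega)]
    have hinner : pvAInner tokens (1 : Int) [] = [] ++ pvLevel tokens 1 := by
      have h := pvAInner_eq tokens 1 (by omega) hlen []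
      rwa [show (((1 : Nat)) : Int) = (1 : Int) from by norm_num] at h
    rw [hinner, List.nil_append]
    have h := pvLoops_agree tokens 9 1 (by omega) (pvLevel tokens 1)
    rwa [show ((1 : Nat) : Int) + 1 + ((9 : Nat) : Int) = (10 + 1 : Int) from by norm_num,
        show ((1 : Nat) : Int) + 1 = (2 : Int) from by norm_num] at h
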